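-- pv_equiv track=rewrite | github.com/sathvik-web/ai_project_generator | backend/agent_generator.py | _detect_framework
-- ===== SOURCE A (Python) =====
-- from typing import List, Dict, Any
--
-- def _detect_framework(tech_stack: List[str]) -> str:
--     """Detect primary framework from tech stack."""
--     tech_lower = [t.lower() for t in tech_stack]
--
--     if "fastapi" in tech_lower:
--         return "fastapi"
--     elif "flask" in tech_lower:
--         return "flask"
--     elif "streamlit" in tech_lower:
--         return "streamlit"
--
--     return "fastapi"
-- ===== SOURCE B (Python) =====
-- def _detect_framework(tech_stack):
--     """Detect primary framework from tech stack."""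
--     ranks = {"fastapi": 0, "flask": 1, "streamlit": 2}
--     names = ("fastapi", "flask", "streamlit")
--     best = 3
--     for t in tech_stack:
--         r = ranks.get(t.lower(), 3)
--         if r < best:
--             best = r
--     return names[best] if best < 3 else "fastapi"
-- ===== Notes on version B (the rewrite author's own statement) =====
-- stated objective: alternative
-- what changed: Replaces A's lowered-copy list plus three sequential membership scans with a single pass that looks up each element's priority rank in a dict and tracks the minimum rank, returning the best-ranked framework name (default fastapi).
import Mathlib
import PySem

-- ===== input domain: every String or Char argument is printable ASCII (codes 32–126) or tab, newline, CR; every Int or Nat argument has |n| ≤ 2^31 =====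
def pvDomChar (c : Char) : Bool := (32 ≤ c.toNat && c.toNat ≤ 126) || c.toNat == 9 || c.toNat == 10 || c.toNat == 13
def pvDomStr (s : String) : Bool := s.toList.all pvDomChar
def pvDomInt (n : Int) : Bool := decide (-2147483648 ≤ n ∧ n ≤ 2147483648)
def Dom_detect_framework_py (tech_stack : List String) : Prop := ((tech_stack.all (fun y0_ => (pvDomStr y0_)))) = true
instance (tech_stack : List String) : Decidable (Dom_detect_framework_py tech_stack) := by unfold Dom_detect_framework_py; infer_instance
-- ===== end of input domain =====

-- B replaces A's three sequential membership scans over a lowered copy with one pass tracking the minimum priority rank from a dict (alternative decomposition, same cost).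


-- ===== PORT A =====
def detect_framework_py (tech_stack : List String) : String :=
  let tech_lower := tech_stack.map PySem.Str.lower
  if "fastapi" ∈ tech_lower then "fastapi"
  else if "flask" ∈ tech_lower then "flask"
  else if "streamlit" ∈ tech_lower then "streamlit"
  else "fastapi"

-- ===== PORT B =====
-- ranks = {"fastapi": 0, "flask": 1, "streamlit": 2}
def pvRanks : PySem.Dict String Nat :=
  PySem.Dict.ofList [("fastapi", 0), ("flask", 1), ("streamlit", 2)]

-- loop body: r = ranks.get(t.lower(), 3); if r < best: best = r
def pvStep (b : Nat) (t : String) : Nat :=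
  let r := pvRanks.getD (PySem.Str.lower t) 3
  if r < b then r else b

def detect_framework_py_alt (tech_stack : List String) : String :=
  let best := tech_stack.foldl pvStep 3
  if best < 3 then
    -- names[best] for the 3-tuple names
    if best = 0 then "fastapi" else if best = 1 then "flask" else "streamlit"
  else "fastapi"

-- ===== PRECONDITION & SPEC =====
def Spec_detect_framework_py (tech_stack : List String) (out : String) : Prop := out = detect_framework_py_alt tech_stack
instance (tech_stack : List String) (out : String) : Decidable (Spec_detect_framework_py tech_stack out) := by unfold Spec_detect_framework_py; infer_instance

-- ===== CLAIM (what is proved, stated in full; the proofs are below) =====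
def Claim_equal_detect_framework_py : Prop := ∀ (tech_stack : List String), Dom_detect_framework_py tech_stack → Spec_detect_framework_py tech_stack (detect_framework_py tech_stack)

-- ===== LEMMAS AND PROOFS =====

-- A's membership chain expressed as a minimum rank
def pvE (xs : List String) : Nat :=
  let L := xs.map PySem.Str.lower
  if "fastapi" ∈ L then 0
  else if "flask" ∈ L then 1
  else if "streamlit" ∈ L then 2
  else 3

theorem pvRank_eq (t : String) :
    pvRanks.getD (PySem.Str.lower t) 3 =
      (if "fastapi" = PySem.Str.lower t then 0
       else if "flask" = PySem.Str.lower t then 1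
       else if "streamlit" = PySem.Str.lower t then 2 else 3) := by
  have h : pvRanks = PySem.Dict.mk [("fastapi", 0), ("flask", 1), ("streamlit", 2)] := by rfl
  rw [h]
  simp only [PySem.Dict.getD, PySem.Dict.get?_mk_cons, beq_iff_eq]
  split_ifs <;> simp_all [PySem.Dict.get?]

theorem pvStep_eq_min (b : Nat) (t : String) :
    pvStep b t = min b (pvRanks.getD (PySem.Str.lower t) 3) := by
  simp only [pvStep]; split <;> omega

theorem pvE_cons (x : String) (xs : List String) :
    pvE (x :: xs) = min (pvRanks.getD (PySem.Str.lower x) 3) (pvE xs) := by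
  rw [pvRank_eq]
  simp only [pvE, List.map_cons, List.mem_cons]
  by_cases h1 : "fastapi" = PySem.Str.lower x
  · rw [if_pos (Or.inl h1), if_pos h1]
    exact (Nat.zero_min _).symm
  · rw [if_neg h1]
    by_cases m1 : "fastapi" ∈ xs.map PySem.Str.lower
    · rw [if_pos (Or.inr m1), if_pos m1]
      exact (Nat.min_zero _).symm
    · rw [if_neg (fun h => h.elim h1 m1), if_neg m1]
      by_cases h2 : "flask" = PySem.Str.lower x
      · rw [if_pos (Or.inl h2), if_pos h2]
        split_ifs <;> omega
      · rw [if_neg h2]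
        by_cases m2 : "flask" ∈ xs.map PySem.Str.lower
        · rw [if_pos (Or.inr m2), if_pos m2]
          split_ifs <;> omega
        · rw [if_neg (fun h => h.elim h2 m2), if_neg m2]
          by_cases h3 : "streamlit" = PySem.Str.lower x
          · rw [if_pos (Or.inl h3), if_pos h3]
            split_ifs <;> omega
          · rw [if_neg h3]
            by_cases m3 : "streamlit" ∈ xs.map PySem.Str.lower
            · rw [if_pos (Or.inr m3), if_pos m3]
              omega
            · rw [if_neg (fun h => h.elim h3 m3), if_neg m3]
              omega

theorem pvFold_eq (xs : List String) :
    ∀ b, b ≤ 3 → xs.foldl pvStep b = min b (pvE xs) := by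
  induction xs with
  | nil => intro b hb; simp only [List.foldl_nil, pvE, List.map_nil]; simp; omega
  | cons x xs ih =>
    intro b hb
    rw [List.foldl_cons, ih (pvStep b x)
        (by rw [pvStep_eq_min]; exact le_trans (Nat.min_le_left _ _) hb),
      pvStep_eq_min, pvE_cons]
    omega

-- ===== VERDICT (by name: the statement is the Claim_ definition above) =====
theorem detect_framework_py_spec : Claim_equal_detect_framework_py := by
  intro xs _
  unfold Spec_detect_framework_py
  simp only [detect_framework_py, detect_framework_py_alt,
    pvFold_eq xs 3 (le_refl 3), pvE]
  split_ifs <;> first | rfl | omega
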